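-- pv_equiv track=rewrite | github.com/FabianKel/LAB6-IA | agent.py | check_victoria
-- ===== SOURCE A (Python) =====
-- def check_victoria(tablero, row, col):
--     player = tablero[row][col]
--     direcciones = [(0, 1), (1, 0), (1, 1), (-1, 1)]
--     for dx, dy in direcciones:
--         count = 1
--         for d in (1, -1):
--             paso = 1
--             while True:
--                 x = col + dx * d * paso
--                 y = row + dy * d * paso
--                 if 0 <= x < 7 and 0 <= y < 6 and tablero[y][x] == player:
--                     count += 1
--                     paso += 1
--                 else:
--                     break
--         if count >= 4:
--             return True
--     return False
-- ===== SOURCE B (Python) =====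
-- def check_victoria(tablero, row, col):
--     player = tablero[row][col]
--     for dx, dy in ((0, 1), (1, 0), (1, 1), (-1, 1)):
--         line = [off == 0 or cell_matches(tablero, row + dy * off, col + dx * off, player)
--                 for off in range(-3, 4)]
--         if any(all(line[i:i + 4]) for i in range(4)):
--             return True
--     return False
--
--
-- def cell_matches(tablero, y, x, player):
--     return (0 <= x < 7 and 0 <= y < 6
--             and y < len(tablero) and x < len(tablero[y])
--             and tablero[y][x] == player)
-- ===== Notes on version B (the rewrite author's own statement) =====
-- stated objective: idiomatic
-- what changed: Replaces the two-sided outward while-loop counter per direction by building a fixed 7-flag window (offsets -3..+3, centre forced true as the just-placed piece) and testing it for four consecutive matches, with real length checks so ragged boards never raise.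
import Mathlib
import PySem

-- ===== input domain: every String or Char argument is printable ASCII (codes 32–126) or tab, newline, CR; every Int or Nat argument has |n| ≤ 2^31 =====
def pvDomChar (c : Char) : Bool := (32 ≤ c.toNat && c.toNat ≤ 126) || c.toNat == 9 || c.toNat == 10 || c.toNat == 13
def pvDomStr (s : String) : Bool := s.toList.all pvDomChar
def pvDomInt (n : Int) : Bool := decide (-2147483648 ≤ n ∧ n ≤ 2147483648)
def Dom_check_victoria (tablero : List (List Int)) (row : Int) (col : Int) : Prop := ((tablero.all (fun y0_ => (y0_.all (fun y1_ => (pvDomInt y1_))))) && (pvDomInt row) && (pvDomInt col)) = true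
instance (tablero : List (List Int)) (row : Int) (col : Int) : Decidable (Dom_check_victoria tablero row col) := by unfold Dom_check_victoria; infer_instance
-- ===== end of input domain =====

-- B replaces A's outward two-sided while-loop counter per direction by a fixed 7-flag window
-- (offsets -3..+3, centre forced true as the just-placed piece) tested for four consecutive
-- matches, with real length checks so ragged boards never raise (idiomatic; same cost).

-- ===== PORT A =====
-- tablero[y][x] as an Option
def pvGet2 (tablero : List (List Int)) (y x : Int) : Option Int :=
  (PySem.List.pyGet? tablero y).bind (fun r => PySem.List.pyGet? r x)

-- A's '0 <= x < 7 and 0 <= y < 6 and tablero[y][x] == player'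
def cellHit (tablero : List (List Int)) (player x y : Int) : Bool :=
  decide (0 ≤ x) && decide (x < 7) && decide (0 ≤ y) && decide (y < 6) &&
    (pvGet2 tablero y x == some player)

-- A's inner 'while True' loop: counts contiguous hits at offsets d*paso, d*(paso+1), …
-- (fuel 10 is ample: inside Pre_ the guarded hit test fails before offset 7).
def whileA (g : Int → Bool) (d : Int) : Int → Nat → Int
  | _, 0 => 0
  | paso, fuel+1 => if g (d * paso) then 1 + whileA g d (paso + 1) fuel else 0

def check_victoria (tablero : List (List Int)) (row : Int) (col : Int) : Bool :=
  let player := (pvGet2 tablero row col).getD 0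
  [((0:Int),(1:Int)), (1,0), (1,1), (-1,1)].any (fun p =>
    let g := fun off => cellHit tablero player (col + p.1 * off) (row + p.2 * off)
    decide (4 ≤ 1 + whileA g 1 1 10 + whileA g (-1) 1 10))

-- ===== PORT B =====
-- B's cell_matches(tablero, y, x, player): guard, real length checks, then compare
def cellMatches (tablero : List (List Int)) (y x player : Int) : Bool :=
  decide (0 ≤ x) && decide (x < 7) && decide (0 ≤ y) && decide (y < 6) &&
    decide (y < (tablero.length : Int)) &&
    (match PySem.List.pyGet? tablero y with
     | none => false
     | some r => decide (x < (r.length : Int)) && (PySem.List.pyGet? r x == some player))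

-- line = [ off == 0 or cell_matches(...) | off in range(-3, 4) ]
def lineOf (g : Int → Bool) : List Bool := (PySem.List.pyRange (-3) 4 1).map g

-- any(all(line[i:i+4]) for i in range(4))
def hasFour (line : List Bool) : Bool :=
  (PySem.List.pyRange 0 4 1).any (fun i => (PySem.List.slice line (some i) (some (i + 4))).all id)

def check_victoria_alt (tablero : List (List Int)) (row : Int) (col : Int) : Bool :=
  let player := (pvGet2 tablero row col).getD 0
  [((0:Int),(1:Int)), (1,0), (1,1), (-1,1)].any (fun p =>
    hasFour (lineOf (fun off =>
      (off == 0) || cellMatches tablero (row + p.2 * off) (col + p.1 * off) player)))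

-- ===== PRECONDITION & SPEC =====
-- the guard '0 <= x < 7 and 0 <= y < 6' at offset o of a direction
def pvGuard (row col dx dy o : Int) : Bool :=
  decide (0 ≤ col + dx * o ∧ col + dx * o < 7 ∧ 0 ≤ row + dy * o ∧ row + dy * o < 6)

-- the cell at (y, x) exists on the (possibly ragged) board
def pvCellExists (tablero : List (List Int)) (y x : Int) : Bool :=
  match PySem.List.pyGet? tablero y with
  | none => false
  | some r => decide (x < (r.length : Int))

-- the scan hit test (guard + cell equals player) used by the reach condition below
def pvHitOk (tablero : List (List Int)) (player x y : Int) : Bool :=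
  decide (0 ≤ x ∧ x < 7 ∧ 0 ≤ y ∧ y < 6) &&
    (match PySem.List.pyGet? tablero y with
     | none => false
     | some r => PySem.List.pyGet? r x == some player)

-- along one scan ray: whenever the guard holds at step k+1 and steps 1..k were all hits
-- (so the scan reaches the access at step k+1), the cell at step k+1 exists
def pvChainOk (tablero : List (List Int)) (row col player dx dy d : Int) : Bool :=
  (List.range 7).all (fun k =>
    !(pvGuard row col dx dy (d * ((k:Int) + 1)) &&
      (List.range k).all (fun j =>
        pvHitOk tablero player (col + dx * (d * ((j:Int) + 1))) (row + dy * (d * ((j:Int) + 1))))) ||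
    pvCellExists tablero (row + dy * (d * ((k:Int) + 1))) (col + dx * (d * ((k:Int) + 1))))

-- Pre_ excludes the inputs on which A raises IndexError (invalid tablero[row][col] index, or a
-- reached scan cell missing from a ragged board) and — since it checks every direction while A
-- stops at the first winning one — also the rare boards where A returns True early, before a
-- later direction's scan would have raised; B returns the same value (True) on those.
def Pre_check_victoria (tablero : List (List Int)) (row : Int) (col : Int) : Prop :=
  ((PySem.List.pyGet? tablero row).bind (fun r => PySem.List.pyGet? r col)).isSome = true ∧
  ∀ p ∈ [((0:Int),(1:Int)), (1,0), (1,1), (-1,1)], ∀ d ∈ [(1:Int), -1],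
    pvChainOk tablero row col
      (((PySem.List.pyGet? tablero row).bind (fun r => PySem.List.pyGet? r col)).getD 0)
      p.1 p.2 d = true
instance (tablero : List (List Int)) (row : Int) (col : Int) : Decidable (Pre_check_victoria tablero row col) := by unfold Pre_check_victoria; infer_instance

def pvWitness_check_victoria : List (List Int) × Int × Int :=
  ([[0,0,0,0,0,0,0],[0,0,0,0,0,0,0],[0,0,0,0,0,0,0],
    [0,0,0,0,0,0,0],[0,0,0,0,0,0,0],[0,0,0,0,0,0,0]], 0, 0)

def Spec_check_victoria (tablero : List (List Int)) (row : Int) (col : Int) (out : Bool) : Prop := out = check_victoria_alt tablero row col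
instance (tablero : List (List Int)) (row : Int) (col : Int) (out : Bool) : Decidable (Spec_check_victoria tablero row col out) := by unfold Spec_check_victoria; infer_instance

-- ===== CLAIM (what is proved, stated in full; the proofs are below) =====
def Claim_equal_check_victoria : Prop := ∀ (tablero : List (List Int)) (row : Int) (col : Int), Dom_check_victoria tablero row col → Pre_check_victoria tablero row col → Spec_check_victoria tablero row col (check_victoria tablero row col)

-- ===== LEMMAS AND PROOFS =====

lemma whileA_nonneg (g : Int → Bool) (d : Int) : ∀ (fuel : Nat) (paso : Int), 0 ≤ whileA g d paso fuel := by
  intro fuel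
  induction fuel with
  | zero => intro paso; simp [whileA]
  | succ n ih =>
    intro paso
    simp only [whileA]
    split
    · have := ih (paso + 1); omega
    · omega

lemma whileA_succ (g : Int → Bool) (d paso : Int) (fuel : Nat) :
    whileA g d paso (fuel+1) = if g (d * paso) then 1 + whileA g d (paso + 1) fuel else 0 := rfl

lemma whileA_one (g : Int → Bool) (d : Int) :
    whileA g d 1 10 = if g (d * 1) = true then 1 + whileA g d 2 9 else 0 := by
  rw [show (10:Nat) = 9+1 from rfl, whileA_succ]; norm_num

lemma whileA_two (g : Int → Bool) (d : Int) :
    whileA g d 2 9 = if g (d * 2) = true then 1 + whileA g d 3 8 else 0 := by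
  rw [show (9:Nat) = 8+1 from rfl, whileA_succ]; norm_num

lemma whileA_three (g : Int → Bool) (d : Int) :
    whileA g d 3 8 = if g (d * 3) = true then 1 + whileA g d 4 7 else 0 := by
  rw [show (8:Nat) = 7+1 from rfl, whileA_succ]; norm_num

lemma whileA_ge_one (g : Int → Bool) (d : Int) :
    (1 ≤ whileA g d 1 10) ↔ g (d * 1) = true := by
  have n := whileA_nonneg g d 9 2
  rw [whileA_one]
  cases g (d * 1) <;> simp <;> omega

lemma whileA_ge_two (g : Int → Bool) (d : Int) :
    (2 ≤ whileA g d 1 10) ↔ (g (d * 1) = true ∧ g (d * 2) = true) := by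
  have n := whileA_nonneg g d 8 3
  rw [whileA_one, whileA_two]
  cases g (d * 1) <;> cases g (d * 2) <;> simp <;> omega

lemma whileA_ge_three (g : Int → Bool) (d : Int) :
    (3 ≤ whileA g d 1 10) ↔ (g (d * 1) = true ∧ g (d * 2) = true ∧ g (d * 3) = true) := by
  have n := whileA_nonneg g d 7 4
  rw [whileA_one, whileA_two, whileA_three]
  cases g (d * 1) <;> cases g (d * 2) <;> cases g (d * 3) <;> simp <;> omega

lemma hasFour_lineOf (g : Int → Bool) :
    hasFour (lineOf g) =
      ((g (-3) && g (-2) && g (-1) && g 0) || (g (-2) && g (-1) && g 0 && g 1) ||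
       (g (-1) && g 0 && g 1 && g 2) || (g 0 && g 1 && g 2 && g 3)) := by
  have hr : PySem.List.pyRange (-3) 4 1 = [-3,-2,-1,0,1,2,3] := by decide
  have hr2 : PySem.List.pyRange 0 4 1 = [0,1,2,3] := by decide
  simp [hasFour, lineOf, hr, hr2, PySem.List.slice, PySem.List.clampIdx, Bool.and_assoc, Bool.or_assoc]

-- the heart of the equivalence: 'outward count from a (forced-true) centre ≥ 4'
-- = 'some window of 4 consecutive flags in the centred 7-flag line'
lemma dir_eq (g : Int → Bool) :
    decide (4 ≤ 1 + whileA g 1 1 10 + whileA g (-1) 1 10) =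
      hasFour (lineOf (fun off => (off == 0) || g off)) := by
  rw [hasFour_lineOf]
  have n1 := whileA_nonneg g 1 10 1
  have n2 := whileA_nonneg g (-1) 10 1
  have f1 := whileA_ge_one g 1
  have f2 := whileA_ge_two g 1
  have f3 := whileA_ge_three g 1
  have b1 := whileA_ge_one g (-1)
  have b2 := whileA_ge_two g (-1)
  have b3 := whileA_ge_three g (-1)
  norm_num at f1 f2 f3 b1 b2 b3
  cases hg1 : g 1 <;> cases hg2 : g 2 <;> cases hg3 : g 3 <;>
    cases hc1 : g (-1) <;> cases hc2 : g (-2) <;> cases hc3 : g (-3) <;>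
      simp_all <;> omega

-- B's defensive cell test agrees with A's guarded Option-typed test
lemma cell_eq (tablero : List (List Int)) (player x y : Int) :
    cellMatches tablero y x player = cellHit tablero player x y := by
  unfold cellMatches cellHit pvGet2
  by_cases hy : 0 ≤ y
  · cases h : PySem.List.pyGet? tablero y with
    | none =>
      have hlen : ¬ y < (tablero.length : Int) := by
        have := (PySem.List.pyGet?_eq_none_iff (xs := tablero) (i := y)).mp h
        simp [PySem.Raise.InRange] at this
        omega
      simp [h, hlen]
    | some r =>
      have hlen : y < (tablero.length : Int) := by
        by_contra hc
        have : PySem.List.pyGet? tablero y = none := by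
          rw [PySem.List.pyGet?_eq_none_iff]
          simp [PySem.Raise.InRange]; omega
        simp [this] at h
      by_cases hx : 0 ≤ x
      · cases h2 : PySem.List.pyGet? r x with
        | none =>
          have hxl : ¬ x < (r.length : Int) := by
            have := (PySem.List.pyGet?_eq_none_iff (xs := r) (i := x)).mp h2
            simp [PySem.Raise.InRange] at this
            omega
          simp [h, h2, hlen, hxl]
        | some v =>
          have hxl : x < (r.length : Int) := by
            by_contra hc
            have : PySem.List.pyGet? r x = none := by
              rw [PySem.List.pyGet?_eq_none_iff]
              simp [PySem.Raise.InRange]; omega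
            simp [this] at h2
          simp [h, h2, hlen, hxl]
      · simp [hx]
  · simp [hy]

-- ===== VERDICT (by name: the statement is the Claim_ definition above) =====
theorem check_victoria_spec : Claim_equal_check_victoria := by
  intro tablero row col _ _
  unfold Spec_check_victoria
  have key : ∀ dx dy : Int,
      (decide (4 ≤ 1 + whileA (fun off => cellHit tablero ((pvGet2 tablero row col).getD 0) (col + dx*off) (row + dy*off)) 1 1 10
        + whileA (fun off => cellHit tablero ((pvGet2 tablero row col).getD 0) (col + dx*off) (row + dy*off)) (-1) 1 10))
      = hasFour (lineOf (fun off =>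
          (off == 0) || cellMatches tablero (row + dy*off) (col + dx*off) ((pvGet2 tablero row col).getD 0))) := by
    intro dx dy
    have hfun : (fun off : Int =>
        (off == 0) || cellMatches tablero (row + dy*off) (col + dx*off) ((pvGet2 tablero row col).getD 0))
        = (fun off : Int =>
        (off == 0) || cellHit tablero ((pvGet2 tablero row col).getD 0) (col + dx*off) (row + dy*off)) := by
      funext o; rw [cell_eq]
    rw [hfun]
    exact dir_eq _
  simp only [check_victoria, check_victoria_alt, List.any_cons, List.any_nil, Bool.or_false]
  rw [key 0 1, key 1 0, key 1 1, key (-1) 1]
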